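-- pv_equiv track=rewrite | github.com/androidx/androidx | development/build_log_simplifier/build_log_simplifier.py | collapse_tasks_having_no_output
-- ===== SOURCE A (Python) =====
-- def extract_task_name(line):
--     prefix = "> Task "
--     if line.startswith(prefix):
--         return line[len(prefix):].strip()
--     return None
--
-- def is_task_line(line):
--     return extract_task_name(line) is not None
--
-- def collapse_tasks_having_no_output(lines):
--     result = []
--     # When we see a task name, we might not emit it if it doesn't have any output
--     # This variable is that pending task name, or none if we have no pending task
--     pending_task = None
--     pending_blanks = []
--     for line in lines:
--         is_section = is_task_line(line) or line.startswith("> Configure project ") or line.startswith("FAILURE: Build failed with an exception.")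
--         if is_section:
--             pending_task = line
--             pending_blanks = []
--         elif line.strip() == "":
--             # If we have a pending task and we found a blank line, then hold the blank line,
--             # and only output it if we later find some nonempty output
--             if pending_task is not None:
--                 pending_blanks.append(line)
--             else:
--                 result.append(line)
--         else:
--             # We found some nonempty output, now we emit any pending task names
--             if pending_task is not None:
--                 result.append(pending_task)
--                 result += pending_blanks
--                 pending_task = None
--                 pending_blanks = []
--             result.append(line)
--     return result
-- ===== SOURCE B (Python) =====
-- def _is_section(line):
--     return (line.startswith("> Task ")
--             or line.startswith("> Configure project ")
--             or line.startswith("FAILURE: Build failed with an exception."))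
--
-- def collapse_tasks_having_no_output(lines):
--     # Split into a prefix group plus groups that each start with a section line.
--     groups = []
--     current = []
--     for line in lines:
--         if _is_section(line):
--             groups.append(current)
--             current = [line]
--         else:
--             current.append(line)
--     groups.append(current)
--     # Emit the prefix verbatim; emit a section group only if it has real output after its header.
--     result = list(groups[0])
--     for g in groups[1:]:
--         if any(l.strip() != "" for l in g[1:]):
--             result.extend(g)
--     return result
-- ===== Notes on version B (the rewrite author's own statement) =====
-- stated objective: alternative
-- what changed: B replaces A's single pass with pending-task/pending-blanks state by an explicit group-then-decide decomposition: split the lines into a prefix plus section-headed groups, then emit each section group whole iff some line after its header is non-blank.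
import Mathlib
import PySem

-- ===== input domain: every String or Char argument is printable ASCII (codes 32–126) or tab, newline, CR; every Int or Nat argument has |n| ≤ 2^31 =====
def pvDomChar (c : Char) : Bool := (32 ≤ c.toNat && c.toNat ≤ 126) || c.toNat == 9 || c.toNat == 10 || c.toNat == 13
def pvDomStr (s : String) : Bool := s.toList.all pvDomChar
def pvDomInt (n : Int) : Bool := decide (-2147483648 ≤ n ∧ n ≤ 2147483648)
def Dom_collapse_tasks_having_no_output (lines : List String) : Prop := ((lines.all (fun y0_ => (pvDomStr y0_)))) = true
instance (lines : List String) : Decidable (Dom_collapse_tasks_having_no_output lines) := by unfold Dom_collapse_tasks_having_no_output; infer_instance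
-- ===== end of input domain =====

-- B replaces A's pending-task single pass by an explicit split-into-groups-then-decide decomposition (same O(n) cost, clearer structure).


-- ===== PORT A =====
def extract_task_name (line : String) : Option String :=
  if PySem.Str.startswith line "> Task " then
    some (PySem.Str.strip (PySem.Str.slice line (some 7) none))
  else
    none

def is_task_line (line : String) : Bool :=
  (extract_task_name line).isSome

-- the body of A's for-loop, as a fold step over A's state (result, pending_task, pending_blanks)
def collapseA_step (st : List String × Option String × List String) (line : String) :
    List String × Option String × List String :=
  let result := st.1
  let pending_task := st.2.1
  let pending_blanks := st.2.2
  let is_section := is_task_line line || PySem.Str.startswith line "> Configure project "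
      || PySem.Str.startswith line "FAILURE: Build failed with an exception."
  if is_section then
    (result, some line, [])
  else if PySem.Str.strip line = "" then
    match pending_task with
    | some _ => (result, pending_task, pending_blanks ++ [line])
    | none => (result ++ [line], pending_task, pending_blanks)
  else
    match pending_task with
    | some t => (result ++ [t] ++ pending_blanks ++ [line], none, [])
    | none => (result ++ [line], pending_task, pending_blanks)

def collapse_tasks_having_no_output (lines : List String) : List String :=
  (lines.foldl collapseA_step ([], none, [])).1

-- ===== PORT B =====
def ctno_isSection (line : String) : Bool :=
  PySem.Str.startswith line "> Task " || PySem.Str.startswith line "> Configure project "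
    || PySem.Str.startswith line "FAILURE: Build failed with an exception."

-- any(l.strip() != "" for l in g[1:])
def ctno_keep (g : List String) : Bool :=
  g.tail.any (fun l => !(PySem.Str.strip l == ""))

def collapse_tasks_having_no_output_alt (lines : List String) : List String :=
  let st := lines.foldl
    (fun (st : List (List String) × List String) line =>
      if ctno_isSection line then (st.1 ++ [st.2], [line]) else (st.1, st.2 ++ [line]))
    ([], [])
  match st.1 ++ [st.2] with
  | [] => []
  | g0 :: rest => rest.foldl (fun r g => if ctno_keep g then r ++ g else r) g0

-- ===== PRECONDITION & SPEC =====
def Spec_collapse_tasks_having_no_output (lines : List String) (out : List String) : Prop := out = collapse_tasks_having_no_output_alt lines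
instance (lines : List String) (out : List String) : Decidable (Spec_collapse_tasks_having_no_output lines out) := by unfold Spec_collapse_tasks_having_no_output; infer_instance

-- ===== CLAIM (what is proved, stated in full; the proofs are below) =====
def Claim_equal_collapse_tasks_having_no_output : Prop := ∀ (lines : List String), Dom_collapse_tasks_having_no_output lines → Spec_collapse_tasks_having_no_output lines (collapse_tasks_having_no_output lines)

-- ===== LEMMAS AND PROOFS =====

-- common recursive specification: what remains to be emitted, given the pending (task, held blanks)
def ctnoSpec : Option (String × List String) → List String → List String
  | _, [] => []
  | pend, l :: ls =>
    if ctno_isSection l then ctnoSpec (some (l, [])) ls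
    else
      match pend with
      | none => l :: ctnoSpec none ls
      | some (t, bl) =>
        if PySem.Str.strip l = "" then ctnoSpec (some (t, bl ++ [l])) ls
        else t :: (bl ++ (l :: ctnoSpec none ls))

lemma is_task_line_eq (l : String) :
    is_task_line l = PySem.Str.startswith l "> Task " := by
  simp only [is_task_line, extract_task_name]
  split <;> simp_all

lemma foldA_eq (ls : List String) : ∀ (res : List String) (pend : Option String) (bl : List String),
    (ls.foldl collapseA_step (res, pend, bl)).1
      = res ++ ctnoSpec (pend.map (fun t => (t, bl))) ls := by
  induction ls with
  | nil => intro res pend bl; simp [ctnoSpec]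
  | cons l ls ih =>
    intro res pend bl
    by_cases hs : ctno_isSection l = true
    · have hs' : (is_task_line l || PySem.Str.startswith l "> Configure project "
          || PySem.Str.startswith l "FAILURE: Build failed with an exception.") = true := by
        simpa [ctno_isSection, is_task_line_eq] using hs
      simp only [List.foldl_cons, collapseA_step, hs', ctnoSpec, hs]
      simpa using ih res (some l) []
    · have hs' : (is_task_line l || PySem.Str.startswith l "> Configure project "
          || PySem.Str.startswith l "FAILURE: Build failed with an exception.") = false := by
        simpa [ctno_isSection, is_task_line_eq] using hs
      by_cases hb : PySem.Str.strip l = ""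
      · cases pend with
        | none =>
          simp only [List.foldl_cons, collapseA_step, hs', hb, ctnoSpec]
          simp [hs, ih (res ++ [l]) none bl]
        | some t =>
          simp only [List.foldl_cons, collapseA_step, hs', hb, ctnoSpec]
          simp [hs, ih res (some t) (bl ++ [l])]
      · cases pend with
        | none =>
          simp only [List.foldl_cons, collapseA_step, hs', hb, ctnoSpec]
          simp [hs, ih (res ++ [l]) none bl]
        | some t =>
          simp only [List.foldl_cons, collapseA_step, hs', hb, ctnoSpec]
          simp only [hs, Bool.false_eq_true, if_false]
          simpa [List.append_assoc] using ih (res ++ [t] ++ bl ++ [l]) none []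

-- B side: closed recursive form of the grouping fold
def ctnoGrp (cur : List String) : List String → List (List String)
  | [] => [cur]
  | l :: ls => if ctno_isSection l then cur :: ctnoGrp [l] ls else ctnoGrp (cur ++ [l]) ls

lemma foldS_eq (ls : List String) : ∀ (gs : List (List String)) (cur : List String),
    (ls.foldl (fun (st : List (List String) × List String) line =>
        if ctno_isSection line then (st.1 ++ [st.2], [line]) else (st.1, st.2 ++ [line]))
      (gs, cur)).1
      ++ [(ls.foldl (fun (st : List (List String) × List String) line =>
        if ctno_isSection line then (st.1 ++ [st.2], [line]) else (st.1, st.2 ++ [line]))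
      (gs, cur)).2]
      = gs ++ ctnoGrp cur ls := by
  induction ls with
  | nil => intro gs cur; simp [ctnoGrp]
  | cons l ls ih =>
    intro gs cur
    by_cases hs : ctno_isSection l = true <;>
      simp [ctnoGrp, hs, ih, List.append_assoc]

-- B side: closed recursive form of the emission fold
def ctnoFrec : List (List String) → List String
  | [] => []
  | g :: gs => (if ctno_keep g then g else []) ++ ctnoFrec gs

lemma foldE_eq (gs : List (List String)) : ∀ (init : List String),
    gs.foldl (fun r g => if ctno_keep g then r ++ g else r) init = init ++ ctnoFrec gs := by
  induction gs with
  | nil => intro init; simp [ctnoFrec]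
  | cons g gs ih =>
    intro init
    by_cases hk : ctno_keep g = true <;> simp [ctnoFrec, hk, ih]

lemma ctno_keep_append (g : List String) (l : String) (hg : g ≠ []) :
    ctno_keep (g ++ [l]) = (ctno_keep g || !(PySem.Str.strip l == "")) := by
  cases g with
  | nil => exact absurd rfl hg
  | cons a g' => simp [ctno_keep]

-- joint invariant: a pending group (header + all-blank tail) vs an already-kept group
lemma ctnoGrp_spec (ls : List String) :
    (∀ (t : String) (bl : List String), bl.all (fun l => PySem.Str.strip l == "") = true →
      ctnoFrec (ctnoGrp (t :: bl) ls) = ctnoSpec (some (t, bl)) ls)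
    ∧ (∀ g : List String, ctno_keep g = true →
      ctnoFrec (ctnoGrp g ls) = g ++ ctnoSpec none ls) := by
  induction ls with
  | nil =>
    constructor
    · intro t bl hbl
      have hk : ctno_keep (t :: bl) = false := by
        simp only [ctno_keep, List.tail_cons]
        simp only [List.all_eq_true] at hbl
        simp only [List.any_eq_false]
        intro l hl; simpa using hbl l hl
      simp [ctnoGrp, ctnoFrec, ctnoSpec, hk]
    · intro g hk
      simp [ctnoGrp, ctnoFrec, ctnoSpec, hk]
  | cons l ls ih =>
    constructor
    · intro t bl hbl
      by_cases hs : ctno_isSection l = true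
      · have hk : ctno_keep (t :: bl) = false := by
          simp only [ctno_keep, List.tail_cons]
          simp only [List.all_eq_true] at hbl
          simp only [List.any_eq_false]
          intro x hx; simpa using hbl x hx
        simp [ctnoGrp, ctnoFrec, ctnoSpec, hs, hk, ih.1 l [] (by simp)]
      · by_cases hb : PySem.Str.strip l = ""
        · rw [show ctnoGrp (t :: bl) (l :: ls) = ctnoGrp (t :: (bl ++ [l])) ls by
            simp [ctnoGrp, hs]]
          rw [ih.1 t (bl ++ [l])
            (by simp only [List.all_eq_true] at hbl ⊢
                simp only [List.mem_append, List.mem_singleton]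
                rintro x (hx | rfl)
                · exact hbl x hx
                · simp [hb])]
          simp [ctnoSpec, hs, hb]
        · have hk : ctno_keep ((t :: bl) ++ [l]) = true := by
            rw [ctno_keep_append _ _ (by simp)]
            simp [hb]
          rw [show ctnoGrp (t :: bl) (l :: ls) = ctnoGrp ((t :: bl) ++ [l]) ls by
            simp [ctnoGrp, hs]]
          rw [ih.2 _ hk]
          simp [ctnoSpec, hs, hb]
    · intro g hk
      by_cases hs : ctno_isSection l = true
      · simp [ctnoGrp, ctnoFrec, ctnoSpec, hs, hk, ih.1 l [] (by simp)]
      · have hg : g ≠ [] := by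
          intro h; rw [h] at hk; simp [ctno_keep] at hk
        have hk' : ctno_keep (g ++ [l]) = true := by
          rw [ctno_keep_append _ _ hg]; simp [hk]
        rw [show ctnoGrp g (l :: ls) = ctnoGrp (g ++ [l]) ls by simp [ctnoGrp, hs]]
        rw [ih.2 _ hk']
        simp [ctnoSpec, hs]

lemma ctnoGrp_ne_nil (ls : List String) : ∀ cur, ctnoGrp cur ls ≠ [] := by
  induction ls with
  | nil => intro cur; simp [ctnoGrp]
  | cons l ls ih =>
    intro cur
    by_cases hs : ctno_isSection l = true <;> simp [ctnoGrp, hs, ih]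

-- prefix group is emitted verbatim
lemma ctnoEmit_grp (ls : List String) : ∀ cur,
    (match ctnoGrp cur ls with
     | [] => []
     | g0 :: rest => g0 ++ ctnoFrec rest) = cur ++ ctnoSpec none ls := by
  induction ls with
  | nil => intro cur; simp [ctnoGrp, ctnoFrec, ctnoSpec]
  | cons l ls ih =>
    intro cur
    by_cases hs : ctno_isSection l = true
    · simp [ctnoGrp, ctnoSpec, hs, (ctnoGrp_spec ls).1 l [] (by simp)]
    · rw [show ctnoGrp cur (l :: ls) = ctnoGrp (cur ++ [l]) ls by simp [ctnoGrp, hs]]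
      rw [ih (cur ++ [l])]
      simp [ctnoSpec, hs]

lemma alt_eq_spec (lines : List String) :
    collapse_tasks_having_no_output_alt lines = ctnoSpec none lines := by
  unfold collapse_tasks_having_no_output_alt
  have hsplit := foldS_eq lines [] []
  simp only [List.nil_append] at hsplit
  rcases hg : ctnoGrp ([] : List String) lines with _ | ⟨g0, rest⟩
  · exact absurd hg (ctnoGrp_ne_nil lines [])
  · have := ctnoEmit_grp lines []
    rw [hg] at this hsplit
    simp only [List.nil_append] at this
    simp only [hsplit, foldE_eq]
    exact this

-- ===== VERDICT (by name: the statement is the Claim_ definition above) =====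
theorem collapse_tasks_having_no_output_spec : Claim_equal_collapse_tasks_having_no_output := by
  intro lines _
  unfold Spec_collapse_tasks_having_no_output
  rw [alt_eq_spec]
  have := foldA_eq lines [] none []
  simpa [collapse_tasks_having_no_output] using this
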